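-- pv_equiv track=rewrite | github.com/anson20070818-dot/COMP1110E08 | transport_advisor/rank.py | count_transfer
-- ===== SOURCE A (Python) =====
-- def count_transfer(transport_mode):
--     if len(transport_mode) == 1:
--         return 0
--     count = 0
--     if transport_mode[0] == 'Walking' and (('Bus' in transport_mode) or ('MTR' in transport_mode)):
--         count += 1
--     while ('Walking' in transport_mode):
--         pos = transport_mode.index('Walking')
--         if pos == 0 or pos == len(transport_mode) - 1:
--             transport_mode.pop(pos)
--         else:
--             if transport_mode[pos-1] == transport_mode[pos+1]:
--                 count += 1
--             transport_mode.pop(pos)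
--     for i in range(len(transport_mode)-1):
--         if transport_mode[i] != transport_mode[i+1]:
--             count += 1
--     return count
-- ===== SOURCE B (Python) =====
-- def count_transfer(transport_mode):
--     count = 0
--     has_bus_or_mtr = False
--     prev = None   # last non-Walking mode seen
--     gap = False   # Walking seen since prev
--     for m in transport_mode:
--         if m == 'Bus' or m == 'MTR':
--             has_bus_or_mtr = True
--         if m == 'Walking':
--             gap = True
--         else:
--             if prev is not None and (gap or prev != m):
--                 count += 1
--             prev = m
--             gap = False
--     if transport_mode and transport_mode[0] == 'Walking' and has_bus_or_mtr:
--         count += 1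
--     return count
-- ===== Notes on version B (the rewrite author's own statement) =====
-- stated objective: alternative
-- what changed: A repeatedly scans the list for the leftmost 'Walking' and pops it in place, then rescans the remainder for adjacent differing pairs; B makes one left-to-right pass keeping (last non-Walking mode, Walking-seen-since flag, Bus/MTR-seen flag) and counts each non-Walking element that follows a gap or differs from the previous mode.
import Mathlib
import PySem

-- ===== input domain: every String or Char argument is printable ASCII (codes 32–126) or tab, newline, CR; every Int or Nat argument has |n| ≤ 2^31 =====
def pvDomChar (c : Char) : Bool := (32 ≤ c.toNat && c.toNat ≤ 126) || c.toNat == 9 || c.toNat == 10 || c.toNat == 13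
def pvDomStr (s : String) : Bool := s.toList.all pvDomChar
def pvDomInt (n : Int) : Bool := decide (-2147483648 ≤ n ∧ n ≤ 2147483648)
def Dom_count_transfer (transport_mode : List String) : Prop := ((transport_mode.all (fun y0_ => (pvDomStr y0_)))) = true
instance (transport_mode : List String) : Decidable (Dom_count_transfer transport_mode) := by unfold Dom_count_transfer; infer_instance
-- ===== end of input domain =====

-- B replaces A's repeated leftmost-index/pop loop and final rescan by one left-to-right pass
-- (objective: alternative). A mutates its argument in place (pops from it); B does not —
-- the equivalence proved here is about the return value only.


-- ===== PORT A =====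
-- the 'while Walking in transport_mode' loop of A, with the running count
-- the 'while Walking in transport_mode' loop of A, with the running count.
-- '.pop(pos)' removes the element at pos: the remaining list is eraseIdx pos
-- (PySem.List.pop?_natCast); the popped value is unused by A.
def ctWhile (tm : List String) (count : Int) : List String × Int :=
  if hmem : "Walking" ∈ tm then
    let pos : Nat := (PySem.List.index? tm "Walking").get
      ((PySem.List.index?_isSome_iff tm "Walking").mpr hmem)
    let count' : Int :=
      if (pos : Int) = 0 ∨ (pos : Int) = (tm.length : Int) - 1 then count
      else if PySem.List.pyGetD tm ((pos : Int) - 1) "" = PySem.List.pyGetD tm ((pos : Int) + 1) ""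
        then count + 1 else count
    ctWhile (tm.eraseIdx pos) count'
  else (tm, count)
termination_by tm.length
decreasing_by
  have hsome : PySem.List.index? tm "Walking" =
      some ((PySem.List.index? tm "Walking").get ((PySem.List.index?_isSome_iff tm "Walking").mpr hmem)) :=
    (Option.some_get _).symm
  obtain ⟨hk, -, -⟩ := PySem.List.getElem_of_index?_eq_some hsome
  rw [List.length_eraseIdx_of_lt hk]
  omega

def count_transfer (transport_mode : List String) : Int :=
  if transport_mode.length = 1 then 0
  else
    let count : Int := 0
    let count := if PySem.List.pyGetD transport_mode 0 "" = "Walking" ∧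
        ("Bus" ∈ transport_mode ∨ "MTR" ∈ transport_mode) then count + 1 else count
    let res := ctWhile transport_mode count
    (PySem.List.pyRange 0 ((res.1.length : Int) - 1) 1).foldl
      (fun acc i =>
        if PySem.List.pyGetD res.1 i "" ≠ PySem.List.pyGetD res.1 (i + 1) "" then acc + 1 else acc)
      res.2

-- ===== PORT B =====
def count_transfer_alt (transport_mode : List String) : Int :=
  let st := transport_mode.foldl
    (fun (st : Int × Bool × Option String × Bool) m =>
      let count := st.1
      let has := st.2.1
      let prev := st.2.2.1
      let gap := st.2.2.2
      let has := if m = "Bus" ∨ m = "MTR" then true else has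
      if m = "Walking" then (count, has, prev, true)
      else
        let count := if prev.isSome ∧ (gap ∨ prev ≠ some m) then count + 1 else count
        (count, has, some m, false))
    (0, false, none, false)
  if (transport_mode ≠ [] ∧ PySem.List.pyGetD transport_mode 0 "" = "Walking") ∧ st.2.1 = true
    then st.1 + 1 else st.1

-- ===== PRECONDITION & SPEC =====
-- Pre_ excludes only the empty list, on which A raises IndexError (transport_mode[0]).
def Pre_count_transfer (transport_mode : List String) : Prop := transport_mode ≠ []
instance (transport_mode : List String) : Decidable (Pre_count_transfer transport_mode) := by unfold Pre_count_transfer; infer_instance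
def pvWitness_count_transfer : List String := ["Walking", "Bus", "Walking", "MTR", "MTR"]

def Spec_count_transfer (transport_mode : List String) (out : Int) : Prop := out = count_transfer_alt transport_mode
instance (transport_mode : List String) (out : Int) : Decidable (Spec_count_transfer transport_mode out) := by unfold Spec_count_transfer; infer_instance

-- ===== CLAIM (what is proved, stated in full; the proofs are below) =====
def Claim_equal_count_transfer : Prop := ∀ (transport_mode : List String), Dom_count_transfer transport_mode → Pre_count_transfer transport_mode → Spec_count_transfer transport_mode (count_transfer transport_mode)

-- ===== LEMMAS AND PROOFS =====

-- the list with all "Walking" entries removed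
def strip (l : List String) : List String := l.filter (fun x => x ≠ "Walking")

-- number of adjacent differing pairs
def pd : List String → Int
  | x :: y :: l => (if x ≠ y then 1 else 0) + pd (y :: l)
  | _ => 0

-- count added by A's while loop, by the state of B's pass:
-- wN: no previous non-Walking element yet; wP p: previous is p, no gap; wG p: previous is p, Walking seen since
mutual
def wN : List String → Int
  | [] => 0
  | x :: l => if x = "Walking" then wN l else wP x l
def wP (p : String) : List String → Int
  | [] => 0
  | x :: l => if x = "Walking" then wG p l else wP x l
def wG (p : String) : List String → Int
  | [] => 0
  | x :: l => if x = "Walking" then wG p l else (if p = x then 1 else 0) + wP x l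
end

-- B's pass count as a structural function
def g (prev : Option String) (gap : Bool) : List String → Int
  | [] => 0
  | m :: l =>
    if m = "Walking" then g prev true l
    else (if prev.isSome ∧ (gap ∨ prev ≠ some m) then 1 else 0) + g (some m) false l

theorem wP_of_not_mem (p : String) (l : List String) (h : "Walking" ∉ l) : wP p l = 0 := by
  induction l generalizing p with
  | nil => rfl
  | cons x t ih =>
    have hx : x ≠ "Walking" := fun hx => h (hx ▸ List.mem_cons_self)
    simp [wP, hx, ih x (fun hm => h (List.mem_cons_of_mem _ hm))]

theorem wN_of_not_mem (l : List String) (h : "Walking" ∉ l) : wN l = 0 := by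
  cases l with
  | nil => rfl
  | cons x t =>
    have hx : x ≠ "Walking" := fun hx => h (hx ▸ List.mem_cons_self)
    simp [wN, hx, wP_of_not_mem x t (fun hm => h (List.mem_cons_of_mem _ hm))]

theorem wG_sub (l : List String) (p : String) (hp : p ≠ "Walking") :
    wG p l = wP p l + (if l ≠ [] ∧ p = l.headI then 1 else 0) := by
  cases l with
  | nil => simp [wG, wP]
  | cons x t =>
    by_cases hx : x = "Walking"
    · subst hx
      simp [wG, wP, hp]
    · simp [wG, wP, hx, List.headI]
      by_cases hpx : p = x <;> simp [hpx] <;> ring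

theorem wP_erase (pre : List String) (q : String) (suf : List String)
    (hw : "Walking" ∉ pre) (hq : q ≠ "Walking") :
    wP q (pre ++ "Walking" :: suf) =
      wP q (pre ++ suf) + (if suf ≠ [] ∧ pre.getLastD q = suf.headI then 1 else 0) := by
  induction pre generalizing q with
  | nil => simpa [wP] using wG_sub suf q hq
  | cons x t ih =>
    have hx : x ≠ "Walking" := fun hx => hw (hx ▸ List.mem_cons_self)
    simp only [List.cons_append, wP, if_neg hx, List.getLastD_cons]
    exact ih x (fun hm => hw (List.mem_cons_of_mem _ hm)) hx

theorem wN_erase (pre : List String) (suf : List String) (hw : "Walking" ∉ pre) :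
    wN (pre ++ "Walking" :: suf) =
      wN (pre ++ suf) +
        (if pre ≠ [] ∧ suf ≠ [] ∧ pre.getLastD "Walking" = suf.headI then 1 else 0) := by
  cases pre with
  | nil => simp [wN]
  | cons x t =>
    have hx : x ≠ "Walking" := fun hx => hw (hx ▸ List.mem_cons_self)
    have ht : "Walking" ∉ t := fun hm => hw (List.mem_cons_of_mem _ hm)
    simp only [List.cons_append, wN, if_neg hx, List.getLastD_cons]
    rw [wP_erase t x suf ht hx]
    congr 1
    simp

theorem strip_erase (pre suf : List String) :
    strip (pre ++ "Walking" :: suf) = strip (pre ++ suf) := by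
  simp [strip]

theorem eraseIdx_mid (pre suf : List String) (w : String) :
    (pre ++ w :: suf).eraseIdx pre.length = pre ++ suf := by
  induction pre with
  | nil => simp
  | cons x l ih => simp [ih]

theorem getD_append_last (pre : List String) (d : String) (h : pre ≠ []) (rest : List String) :
    (pre ++ rest).getD (pre.length - 1) d = pre.getLastD d := by
  induction pre with
  | nil => simp at h
  | cons x l ih =>
    cases l with
    | nil => simp
    | cons y t => simpa using ih (by simp)

theorem getD_append_length (suf : List String) (pre : List String) (d : String) :
    (pre ++ suf).getD (pre.length) d = suf.getD 0 d := by
  induction pre with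
  | nil => rfl
  | cons x l ih => simpa using ih

theorem getD_zero_headI (suf : List String) (h : suf ≠ []) : suf.getD 0 "" = suf.headI := by
  cases suf
  · simp at h
  · rfl

theorem strip_of_not_mem (tm : List String) (hmem : "Walking" ∉ tm) : strip tm = tm := by
  refine List.filter_eq_self.mpr ?_
  intro a ha
  simp only [ne_eq, decide_eq_true_eq]
  exact fun h => hmem (h ▸ ha)

theorem ctWhile_eq : ∀ (tm : List String) (c : Int), ctWhile tm c = (strip tm, c + wN tm) := by
  have main : ∀ (n : Nat) (tm : List String), tm.length ≤ n → ∀ c, ctWhile tm c = (strip tm, c + wN tm) := by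
    intro n
    induction n with
    | zero =>
      intro tm hlen c
      have htm : tm = [] := List.length_eq_zero_iff.mp (Nat.le_zero.mp hlen)
      subst htm
      rw [ctWhile]
      simp [strip, wN]
    | succ n ih =>
      intro tm hlen c
      by_cases hmem : "Walking" ∈ tm
      case neg =>
        rw [ctWhile.eq_def, dif_neg hmem]
        simp [strip_of_not_mem tm hmem, wN_of_not_mem tm hmem]
      case pos =>
        obtain ⟨pos, hidx⟩ := Option.isSome_iff_exists.mp
          ((PySem.List.index?_isSome_iff tm "Walking").mpr hmem)
        obtain ⟨pre, suf, htm, hprelen, hpre⟩ :=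
          (PySem.List.index?_eq_some_iff tm "Walking" pos).mp hidx
        have hposlt : pos < tm.length := by subst htm hprelen; simp
        have herase : tm.eraseIdx pos = pre ++ suf := by
          subst htm hprelen; exact eraseIdx_mid pre suf "Walking"
        have hlen2 : (pre ++ suf).length ≤ n := by
          subst htm hprelen; simp at hlen ⊢; omega
        have hIH := ih (pre ++ suf) hlen2
        have hcond : (if (pos : Int) = 0 ∨ (pos : Int) = (tm.length : Int) - 1 then c
            else if PySem.List.pyGetD tm ((pos : Int) - 1) "" = PySem.List.pyGetD tm ((pos : Int) + 1) ""
              then c + 1 else c)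
            = c + (if pre ≠ [] ∧ suf ≠ [] ∧ pre.getLastD "Walking" = suf.headI then 1 else 0) := by
          rcases List.eq_nil_or_concat pre with hpe | hpc
          · subst hpe
            have h0 : (pos : Int) = 0 := by subst hprelen; simp
            simp [h0]
          rcases List.eq_nil_or_concat suf with hse | hsc
          · subst hse
            have hL : (pos : Int) = (tm.length : Int) - 1 := by
              subst htm hprelen; simp
            simp [hL]
          have hpre_ne : pre ≠ [] := by obtain ⟨l, a, rfl⟩ := hpc; simp
          have hsuf_ne : suf ≠ [] := by obtain ⟨l, a, rfl⟩ := hsc; simp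
          have hp1 : 1 ≤ pre.length := List.length_pos_iff.mpr hpre_ne
          have hs1 : 1 ≤ suf.length := List.length_pos_iff.mpr hsuf_ne
          have hne0 : ¬ ((pos : Int) = 0 ∨ (pos : Int) = (tm.length : Int) - 1) := by
            subst htm hprelen
            push_cast [List.length_append, List.length_cons]
            omega
          rw [if_neg hne0]
          have eL : ((pos : Int)) - 1 = ((pos - 1 : Nat) : Int) := by omega
          have eR : ((pos : Int)) + 1 = ((pos + 1 : Nat) : Int) := by push_cast; ring
          have hgetL : PySem.List.pyGetD tm ((pos : Int) - 1) "" = pre.getLastD "Walking" := by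
            rw [eL, PySem.List.pyGetD_natCast]
            subst htm hprelen
            rw [getD_append_last pre "" hpre_ne]
            cases pre with
            | nil => exact absurd rfl hpre_ne
            | cons a t => simp only [List.getLastD_cons]
          have hgetR : PySem.List.pyGetD tm ((pos : Int) + 1) "" = suf.headI := by
            rw [eR, PySem.List.pyGetD_natCast]
            subst htm hprelen
            have hsplit : pre ++ "Walking" :: suf = (pre ++ ["Walking"]) ++ suf := by simp
            rw [hsplit]
            have hl : pre.length + 1 = (pre ++ ["Walking"]).length := by simp
            rw [hl, getD_append_length suf _ ""]
            exact getD_zero_headI suf hsuf_ne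
          rw [hgetL, hgetR]
          split_ifs with h1 h2 h3
          · ring
          · exact absurd ⟨hpre_ne, hsuf_ne, h1⟩ h2
          · exact absurd h3.2.2 h1
          · ring
        have hget : (PySem.List.index? tm "Walking").get
            ((PySem.List.index?_isSome_iff tm "Walking").mpr hmem) = pos := by
          simp only [PySem.List.index?_eq_idxOf?] at hidx
          simp [hidx]
        rw [ctWhile.eq_def, dif_pos hmem]
        simp only [hget]
        rw [hcond, herase, hIH]
        subst htm hprelen
        rw [strip_erase, wN_erase pre suf hpre, Prod.mk.injEq]
        exact ⟨rfl, by ring⟩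
  intro tm c
  exact main tm.length tm (le_refl _) c

theorem g_some (l : List String) : ∀ (p : String) (b : Bool), p ≠ "Walking" →
    g (some p) b l = (if b then wG p l else wP p l) + pd (p :: strip l) := by
  induction l with
  | nil => intro p b _; cases b <;> simp [g, wG, wP, strip, pd]
  | cons x t ih =>
    intro p b hp
    by_cases hx : x = "Walking"
    · subst hx
      have h1 := ih p true hp
      cases b <;> simp [g, wG, wP, strip, h1]
    · have h1 := ih x false hx
      have hs : strip (x :: t) = x :: strip t := by simp [strip, hx]
      cases b
      · simp [g, wG, wP, hx, hs, pd, h1]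
        by_cases hpx : p = x <;> simp [hpx] <;> ring
      · simp [g, wG, wP, hx, hs, pd, h1]
        by_cases hpx : p = x <;> simp [hpx] <;> ring

theorem g_none (l : List String) : ∀ (b : Bool), g none b l = wN l + pd (strip l) := by
  induction l with
  | nil => intro b; simp [g, wN, strip, pd]
  | cons x t ih =>
    intro b
    by_cases hx : x = "Walking"
    · subst hx; simp [g, wN, strip, ih true]
    · have hs : strip (x :: t) = x :: strip t := by simp [strip, hx]
      simp [g, wN, hx, hs, g_some t x false hx]

theorem pd_fold : ∀ (r : List String) (c : Int),
    (PySem.List.pyRange 0 ((r.length : Int) - 1) 1).foldl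
      (fun acc i =>
        if PySem.List.pyGetD r i "" ≠ PySem.List.pyGetD r (i + 1) "" then acc + 1 else acc) c
    = c + pd r := by
  intro r
  induction r with
  | nil => intro c; simp [pd, PySem.List.pyRange_one_eq_nil]
  | cons x t ih =>
    cases t with
    | nil => intro c; simp [pd, PySem.List.pyRange_one_eq_nil]
    | cons y l =>
      intro c
      have hlen : ((x :: y :: l).length : Int) - 1 = ((l.length : Int) + 1) := by
        push_cast [List.length_cons]; ring
      rw [hlen, PySem.List.pyRange_one_cons (by omega)]
      simp only [List.foldl_cons]
      have h0 : PySem.List.pyGetD (x :: y :: l) 0 "" = x := PySem.List.pyGetD_zero_cons x _ ""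
      have h1 : PySem.List.pyGetD (x :: y :: l) (0 + 1) "" = y := by
        have e : (0 : Int) + 1 = ((1 : Nat) : Int) := by norm_num
        rw [e, PySem.List.pyGetD_natCast]; rfl
      rw [h0, h1]
      have e1 : ((l.length : Int) + 1 - 1).toNat = l.length := by omega
      have e2 : (((y :: l).length : Int) - 1 - 0).toNat = l.length := by simp
      have hrange : PySem.List.pyRange 1 ((l.length : Int) + 1) 1
          = (List.range l.length).map (fun (k : Nat) => (1 : Int) + (k : Int)) := by
        rw [PySem.List.pyRange_one, e1]
      have hrange' : PySem.List.pyRange 0 (((y :: l).length : Int) - 1) 1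
          = (List.range l.length).map (fun (k : Nat) => (0 : Int) + (k : Int)) := by
        rw [PySem.List.pyRange_one, e2]
      have hshift : (fun (acc : Int) (k : Nat) =>
          if PySem.List.pyGetD (x :: y :: l) ((1 : Int) + k) "" ≠ PySem.List.pyGetD (x :: y :: l) ((1 : Int) + k + 1) "" then acc + 1 else acc)
          = (fun (acc : Int) (k : Nat) =>
          if PySem.List.pyGetD (y :: l) ((0 : Int) + k) "" ≠ PySem.List.pyGetD (y :: l) ((0 : Int) + k + 1) "" then acc + 1 else acc) := by
        funext acc k
        have e1 : (1 : Int) + k = ((k + 1 : Nat) : Int) := by push_cast; ring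
        have e2 : ((k + 1 : Nat) : Int) + 1 = ((k + 2 : Nat) : Int) := by push_cast; ring
        have e3 : (0 : Int) + k = ((k : Nat) : Int) := by push_cast; ring
        have e4 : ((k : Nat) : Int) + 1 = ((k + 1 : Nat) : Int) := by push_cast; ring
        rw [e1, e2, e3, e4]
        simp only [PySem.List.pyGetD_natCast]
        rfl
      have hi := ih (if x ≠ y then c + 1 else c)
      rw [hrange', List.foldl_map] at hi
      simp only [zero_add]
      rw [hrange, List.foldl_map]
      rw [hshift, hi]
      by_cases hxy : x = y <;> simp [pd, hxy] <;> ring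

theorem B_fst : ∀ (l : List String) (st : Int × Bool × Option String × Bool),
    (l.foldl (fun (st : Int × Bool × Option String × Bool) m =>
      let count := st.1
      let has := st.2.1
      let prev := st.2.2.1
      let gap := st.2.2.2
      let has := if m = "Bus" ∨ m = "MTR" then true else has
      if m = "Walking" then (count, has, prev, true)
      else
        let count := if prev.isSome ∧ (gap ∨ prev ≠ some m) then count + 1 else count
        (count, has, some m, false)) st).1 = st.1 + g st.2.2.1 st.2.2.2 l := by
  intro l
  induction l with
  | nil => intro st; simp [g]
  | cons x t ih =>
    intro st
    rw [List.foldl_cons, ih]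
    by_cases hx : x = "Walking"
    · simp [g, hx]
    · simp [g, hx]
      split_ifs <;> ring

theorem B_has : ∀ (l : List String) (st : Int × Bool × Option String × Bool),
    (l.foldl (fun (st : Int × Bool × Option String × Bool) m =>
      let count := st.1
      let has := st.2.1
      let prev := st.2.2.1
      let gap := st.2.2.2
      let has := if m = "Bus" ∨ m = "MTR" then true else has
      if m = "Walking" then (count, has, prev, true)
      else
        let count := if prev.isSome ∧ (gap ∨ prev ≠ some m) then count + 1 else count
        (count, has, some m, false)) st).2.1
      = (st.2.1 || l.any (fun m => decide (m = "Bus" ∨ m = "MTR"))) := by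
  intro l
  induction l with
  | nil => intro st; simp
  | cons x t ih =>
    intro st
    rw [List.foldl_cons, ih]
    by_cases hx : x = "Walking" <;> by_cases hb : x = "Bus" ∨ x = "MTR" <;>
      [skip; skip; skip; obtain ⟨h1, h2⟩ := not_or.mp hb] <;>
      simp [hx, hb, *] <;> split_ifs <;> simp [*]

theorem any_busmtr (tm : List String) :
    tm.any (fun m => decide (m = "Bus" ∨ m = "MTR")) = true ↔ ("Bus" ∈ tm ∨ "MTR" ∈ tm) := by
  simp only [List.any_eq_true, decide_eq_true_eq]
  constructor
  · rintro ⟨m, hm, rfl | rfl⟩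
    · exact Or.inl hm
    · exact Or.inr hm
  · rintro (h | h)
    · exact ⟨_, h, Or.inl rfl⟩
    · exact ⟨_, h, Or.inr rfl⟩

theorem alt_singleton (x : String) : count_transfer_alt [x] = 0 := by
  unfold count_transfer_alt
  by_cases hx : x = "Walking"
  · subst hx
    simp
  · by_cases hb : x = "Bus" ∨ x = "MTR" <;>
      simp [hx, hb, PySem.List.pyGetD_zero_cons]

-- ===== VERDICT (by name: the statement is the Claim_ definition above) =====
theorem count_transfer_spec : Claim_equal_count_transfer := by
  intro tm _ hpre
  unfold Spec_count_transfer
  by_cases hlen : tm.length = 1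
  · obtain ⟨x, rfl⟩ := List.length_eq_one_iff.mp hlen
    rw [count_transfer, if_pos hlen, alt_singleton]
  · have hA : count_transfer tm
        = (if PySem.List.pyGetD tm 0 "" = "Walking" ∧ ("Bus" ∈ tm ∨ "MTR" ∈ tm)
            then (0 : Int) + 1 else 0) + wN tm + pd (strip tm) := by
      unfold count_transfer
      rw [if_neg hlen]
      simp only [ctWhile_eq]
      rw [pd_fold]
    have hB : count_transfer_alt tm
        = (0 + g none false tm)
          + (if (tm ≠ [] ∧ PySem.List.pyGetD tm 0 "" = "Walking")
              ∧ (false || tm.any (fun m => decide (m = "Bus" ∨ m = "MTR"))) = true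
             then 1 else 0) := by
      unfold count_transfer_alt
      simp only [B_fst, B_has]
      split_ifs <;> ring
    rw [hA, hB, g_none tm false]
    by_cases hcnd : PySem.List.pyGetD tm 0 "" = "Walking" ∧ ("Bus" ∈ tm ∨ "MTR" ∈ tm)
    · rw [if_pos hcnd,
        if_pos (show (tm ≠ [] ∧ PySem.List.pyGetD tm 0 "" = "Walking")
            ∧ (false || tm.any (fun m => decide (m = "Bus" ∨ m = "MTR"))) = true from by
          refine ⟨⟨hpre, hcnd.1⟩, ?_⟩
          rw [Bool.false_or]
          exact (any_busmtr tm).mpr hcnd.2)]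
      ring
    · rw [if_neg hcnd,
        if_neg (show ¬ ((tm ≠ [] ∧ PySem.List.pyGetD tm 0 "" = "Walking")
            ∧ (false || tm.any (fun m => decide (m = "Bus" ∨ m = "MTR"))) = true) from by
          intro h
          exact hcnd ⟨h.1.2, (any_busmtr tm).mp (by simpa using h.2)⟩)]
      ring
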